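-- pv_equiv track=rewrite | github.com/joqjoq966/Algorithm_python | Codeforces/Educational Round 103/d.py | solve
-- ===== SOURCE A (Python) =====
-- def solve(n,s):
--     ans = [1]*(n+1)
--     for i in range(n+1):
--         l, r = i-1, i
--         move = 0
--         while l>=0:
--             if move%2==0 and s[l]=="L":
--                 move += 1
--                 l-=1
--             elif move%2==1 and s[l]=="R":
--                 move +=1
--                 l-=1
--             else:
--                 break
--         ans[i] += move
--         move = 0
--         while r<=n:
--             if move%2==0 and s[r]=="R":
--                 move += 1
--                 r+=1
--             elif move%2==1 and s[r]=="L":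
--                 move +=1
--                 r+=1
--             else:
--                 break
--         ans[i] += move
--
--     return ans
-- ===== SOURCE B (Python) =====
-- def solve(n, s):
--     # Precompute alternating L/R run lengths in two passes; answer each position by lookups.
--     runL = []            # runL[j] = length of the maximal alternating L/R run ending at j
--     run = 0
--     prev = None
--     for c in s:
--         run = run + 1 if (prev == 'L' and c == 'R') or (prev == 'R' and c == 'L') else 1
--         runL.append(run)
--         prev = c
--     runR = []            # runR[j] = length of the maximal alternating L/R run starting at j
--     run = 0
--     prev = None
--     for c in reversed(s):
--         run = run + 1 if (prev == 'L' and c == 'R') or (prev == 'R' and c == 'L') else 1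
--         runR.append(run)
--         prev = c
--     runR.reverse()
--     ans = []
--     for i in range(n + 1):
--         left = runL[i - 1] if i >= 1 and s[i - 1] == 'L' else 0
--         right = min(runR[i], n + 1 - i) if s[i] == 'R' else 0
--         ans.append(1 + left + right)
--     return ans
-- ===== Notes on version B (the rewrite author's own statement) =====
-- stated objective: alternative
-- what changed: Instead of re-scanning the alternating chain left and right from every position, B precomputes in two linear passes the alternating L/R run length ending at and starting at each index, then answers every position by lookups (capping the right run at the bound n+1-i).
import Mathlib
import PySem

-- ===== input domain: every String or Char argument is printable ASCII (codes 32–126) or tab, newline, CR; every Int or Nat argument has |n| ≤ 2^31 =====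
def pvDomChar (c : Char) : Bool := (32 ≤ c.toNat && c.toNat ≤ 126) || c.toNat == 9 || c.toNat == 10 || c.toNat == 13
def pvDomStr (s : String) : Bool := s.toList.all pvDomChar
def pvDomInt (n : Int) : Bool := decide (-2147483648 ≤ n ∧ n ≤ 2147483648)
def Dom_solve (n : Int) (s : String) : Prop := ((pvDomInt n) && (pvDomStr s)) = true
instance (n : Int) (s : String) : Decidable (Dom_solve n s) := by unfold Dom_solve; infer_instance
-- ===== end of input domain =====

-- B replaces A's per-position chain re-scans by two passes of precomputed
-- alternating L/R run lengths plus per-position lookups (objective: alternative).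


-- ===== PORT A =====
-- s[i] as a Char; inside Pre_ every access of either port is in range, so the ' ' default is never the result
def pyChar (s : String) (i : Int) : Char := (PySem.Str.pyGet? s i).getD ' '

-- the 'while l>=0: …' loop of A, returning the final move
def solveLeftLoop (s : String) (l move : Int) : Int :=
  if _h : 0 ≤ l then
    if PySem.Int.mod move 2 == 0 && pyChar s l == 'L' then
      solveLeftLoop s (l - 1) (move + 1)
    else if PySem.Int.mod move 2 == 1 && pyChar s l == 'R' then
      solveLeftLoop s (l - 1) (move + 1)
    else move
  else move
termination_by (l + 1).toNat
decreasing_by all_goals (simp_wf; omega)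

-- the 'while r<=n: …' loop of A, returning the final move
def solveRightLoop (s : String) (n r move : Int) : Int :=
  if _h : r ≤ n then
    if PySem.Int.mod move 2 == 0 && pyChar s r == 'R' then
      solveRightLoop s n (r + 1) (move + 1)
    else if PySem.Int.mod move 2 == 1 && pyChar s r == 'L' then
      solveRightLoop s n (r + 1) (move + 1)
    else move
  else move
termination_by (n + 1 - r).toNat
decreasing_by all_goals (simp_wf; omega)

-- A: ans = [1]*(n+1); for each i, ans[i] += left moves + right moves
def solve (n : Int) (s : String) : List Int :=
  (PySem.List.pyRange 0 (n + 1) 1).map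
    (fun i => 1 + solveLeftLoop s (i - 1) 0 + solveRightLoop s n i 0)

-- ===== PORT B =====
-- '(prev == 'L' and c == 'R') or (prev == 'R' and c == 'L')' with prev None initially
def altPair (prev : Option Char) (c : Char) : Bool :=
  match prev with
  | some p => (p == 'L' && c == 'R') || (p == 'R' && c == 'L')
  | none => false

-- the 'run/prev' accumulation pass of B (list of run lengths, in traversal order)
def scanRuns : List Char → Int → Option Char → List Int
  | [], _, _ => []
  | c :: rest, run, prev =>
    let r := if altPair prev c then run + 1 else 1
    r :: scanRuns rest r (some c)

def solve_alt (n : Int) (s : String) : List Int :=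
  let cs := s.toList
  let runL := scanRuns cs 0 none
  let runR := (scanRuns cs.reverse 0 none).reverse
  (PySem.List.pyRange 0 (n + 1) 1).map (fun i =>
    let left := if 1 ≤ i && pyChar s (i - 1) == 'L'
                then (PySem.List.pyGet? runL (i - 1)).getD 0 else 0
    let right := if pyChar s i == 'R'
                 then min ((PySem.List.pyGet? runR i).getD 0) (n + 1 - i) else 0
    1 + left + right)

-- ===== PRECONDITION & SPEC =====
-- Pre_ excludes exactly the inputs where A raises IndexError: when 0 ≤ n the loop for
-- i = n always reads s[n], so A returns normally iff n < 0 or the string has length ≥ n+1.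
def Pre_solve (n : Int) (s : String) : Prop := n < 0 ∨ n + 1 ≤ (s.toList.length : Int)
instance (n : Int) (s : String) : Decidable (Pre_solve n s) := by unfold Pre_solve; infer_instance
def pvWitness_solve : Int × String := (2, "LRL")

def Spec_solve (n : Int) (s : String) (out : List Int) : Prop := out = solve_alt n s
instance (n : Int) (s : String) (out : List Int) : Decidable (Spec_solve n s out) := by unfold Spec_solve; infer_instance

-- ===== CLAIM (what is proved, stated in full; the proofs are below) =====
def Claim_equal_solve : Prop := ∀ (n : Int) (s : String), Dom_solve n s → Pre_solve n s → Spec_solve n s (solve n s)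

-- ===== LEMMAS AND PROOFS =====

-- proof-side characterisation of A's left loop: alternating chain going down from l,
-- expecting 'L' when e, 'R' when not e
def chainL (cs : List Char) (l : Int) (e : Bool) : Int :=
  if _h : 0 ≤ l then
    if cs.getD l.toNat ' ' = (if e then 'L' else 'R') then 1 + chainL cs (l - 1) (!e) else 0
  else 0
termination_by (l + 1).toNat
decreasing_by simp_wf; omega

-- proof-side characterisation of A's right loop: alternating chain going up from r, bounded by n
def chainR (cs : List Char) (n r : Int) (e : Bool) : Int :=
  if _h : r ≤ n then
    if cs.getD r.toNat ' ' = (if e then 'R' else 'L') then 1 + chainR cs n (r + 1) (!e) else 0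
  else 0
termination_by (n + 1 - r).toNat
decreasing_by simp_wf; omega

theorem pyChar_nonneg (s : String) (i : Int) (h : 0 ≤ i) :
    pyChar s i = s.toList.getD i.toNat ' ' := by
  have h1 : i = ((i.toNat : Nat) : Int) := by omega
  rw [pyChar, h1, PySem.Str.pyGet?_natCast, List.getD_eq_getElem?_getD, Int.toNat_natCast]

theorem solveLeftLoop_chain (s : String) (l move : Int) (h : 0 ≤ move) :
    solveLeftLoop s l move = move + chainL s.toList l (PySem.Int.mod move 2 == 0) := by
  revert h
  induction l, move using solveLeftLoop.induct s with
  | case1 l move hl hb ih =>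
    intro h
    have hm : PySem.Int.mod move 2 = move % 2 := PySem.Int.mod_eq_emod_of_pos (by omega)
    have hm1 : PySem.Int.mod (move + 1) 2 = (move + 1) % 2 :=
      PySem.Int.mod_eq_emod_of_pos (by omega)
    have hb' : PySem.Int.mod move 2 = 0 ∧ pyChar s l = 'L' := by simpa using hb
    have hm0 : move % 2 = 0 := by rw [← hm]; exact hb'.1
    have he : (PySem.Int.mod move 2 == 0) = true := by rw [hb'.1]; rfl
    have he1 : (PySem.Int.mod (move + 1) 2 == 0) = false := by
      have h1 : PySem.Int.mod (move + 1) 2 = 1 := by rw [hm1]; omega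
      rw [h1]; rfl
    rw [he, chainL, dif_pos hl, if_pos (by rw [← pyChar_nonneg s l hl, hb'.2]; rfl)]
    rw [solveLeftLoop, dif_pos hl, if_pos hb, ih (by omega), he1]
    simp only [Bool.not_true]
    ring
  | case2 l move hl hb1 hb2 ih =>
    intro h
    have hm : PySem.Int.mod move 2 = move % 2 := PySem.Int.mod_eq_emod_of_pos (by omega)
    have hm1 : PySem.Int.mod (move + 1) 2 = (move + 1) % 2 :=
      PySem.Int.mod_eq_emod_of_pos (by omega)
    have hb' : PySem.Int.mod move 2 = 1 ∧ pyChar s l = 'R' := by simpa using hb2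
    have hm0 : move % 2 = 1 := by rw [← hm]; exact hb'.1
    have he : (PySem.Int.mod move 2 == 0) = false := by rw [hb'.1]; rfl
    have he1 : (PySem.Int.mod (move + 1) 2 == 0) = true := by
      have h1 : PySem.Int.mod (move + 1) 2 = 0 := by rw [hm1]; omega
      rw [h1]; rfl
    rw [he, chainL, dif_pos hl, if_pos (by rw [← pyChar_nonneg s l hl, hb'.2]; rfl)]
    rw [solveLeftLoop, dif_pos hl, if_neg hb1, if_pos hb2, ih (by omega), he1]
    simp only [Bool.not_false]
    ring
  | case3 l move hl hb1 hb2 =>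
    intro h
    have hm : PySem.Int.mod move 2 = move % 2 := PySem.Int.mod_eq_emod_of_pos (by omega)
    have hmr : PySem.Int.mod move 2 = 0 ∨ PySem.Int.mod move 2 = 1 := by rw [hm]; omega
    rw [solveLeftLoop, dif_pos hl, if_neg hb1, if_neg hb2]
    rw [chainL, dif_pos hl, if_neg ?_]
    · omega
    · rw [← pyChar_nonneg s l hl]
      rcases hmr with h2 | h2
      · rw [h2] at hb1 ⊢
        simp at hb1 ⊢
        exact hb1
      · rw [h2] at hb2 ⊢
        simp at hb2 ⊢
        exact hb2
  | case4 l move hl =>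
    intro h
    rw [solveLeftLoop, dif_neg hl, chainL, dif_neg hl]; omega

theorem solveRightLoop_chain (s : String) (n r move : Int) (h : 0 ≤ move) (hr0 : 0 ≤ r) :
    solveRightLoop s n r move = move + chainR s.toList n r (PySem.Int.mod move 2 == 0) := by
  revert h hr0
  induction r, move using solveRightLoop.induct s n with
  | case1 r move hr hb ih =>
    intro h hr0
    have hm : PySem.Int.mod move 2 = move % 2 := PySem.Int.mod_eq_emod_of_pos (by omega)
    have hm1 : PySem.Int.mod (move + 1) 2 = (move + 1) % 2 := PySem.Int.mod_eq_emod_of_pos (by omega)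
    have hb' : PySem.Int.mod move 2 = 0 ∧ pyChar s r = 'R' := by simpa using hb
    have hm0 : move % 2 = 0 := by rw [← hm]; exact hb'.1
    have he : (PySem.Int.mod move 2 == 0) = true := by rw [hb'.1]; rfl
    have he1 : (PySem.Int.mod (move + 1) 2 == 0) = false := by
      have h1 : PySem.Int.mod (move + 1) 2 = 1 := by rw [hm1]; omega
      rw [h1]; rfl
    rw [he, chainR, dif_pos hr, if_pos (by rw [← pyChar_nonneg s r hr0, hb'.2]; rfl)]
    rw [solveRightLoop, dif_pos hr, if_pos hb, ih (by omega) (by omega), he1]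
    simp only [Bool.not_true]
    ring
  | case2 r move hr hb1 hb2 ih =>
    intro h hr0
    have hm : PySem.Int.mod move 2 = move % 2 := PySem.Int.mod_eq_emod_of_pos (by omega)
    have hm1 : PySem.Int.mod (move + 1) 2 = (move + 1) % 2 := PySem.Int.mod_eq_emod_of_pos (by omega)
    have hb' : PySem.Int.mod move 2 = 1 ∧ pyChar s r = 'L' := by simpa using hb2
    have hm0 : move % 2 = 1 := by rw [← hm]; exact hb'.1
    have he : (PySem.Int.mod move 2 == 0) = false := by rw [hb'.1]; rfl
    have he1 : (PySem.Int.mod (move + 1) 2 == 0) = true := by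
      have h1 : PySem.Int.mod (move + 1) 2 = 0 := by rw [hm1]; omega
      rw [h1]; rfl
    rw [he, chainR, dif_pos hr, if_pos (by rw [← pyChar_nonneg s r hr0, hb'.2]; rfl)]
    rw [solveRightLoop, dif_pos hr, if_neg hb1, if_pos hb2, ih (by omega) (by omega), he1]
    simp only [Bool.not_false]
    ring
  | case3 r move hr hb1 hb2 =>
    intro h hr0
    have hm : PySem.Int.mod move 2 = move % 2 := PySem.Int.mod_eq_emod_of_pos (by omega)
    have hmr : PySem.Int.mod move 2 = 0 ∨ PySem.Int.mod move 2 = 1 := by rw [hm]; omega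
    rw [solveRightLoop, dif_pos hr, if_neg hb1, if_neg hb2]
    rw [chainR, dif_pos hr, if_neg ?_]
    · omega
    · rw [← pyChar_nonneg s r hr0]
      rcases hmr with h2 | h2
      · rw [h2] at hb1 ⊢
        simp at hb1 ⊢
        exact hb1
      · rw [h2] at hb2 ⊢
        simp at hb2 ⊢
        exact hb2
  | case4 r move hr =>
    intro h hr0
    rw [solveRightLoop, dif_neg hr, chainR, dif_neg hr]; omega

theorem scanRuns_length (cs : List Char) (run : Int) (prev : Option Char) :
    (scanRuns cs run prev).length = cs.length := by
  induction cs generalizing run prev with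
  | nil => simp [scanRuns]
  | cons c rest ih => simp [scanRuns, ih]

theorem scanRuns_getD_zero (cs : List Char) (run : Int) (prev : Option Char) (h : cs ≠ []) :
    (scanRuns cs run prev).getD 0 0 = if altPair prev (cs.getD 0 ' ') then run + 1 else 1 := by
  cases cs with
  | nil => exact absurd rfl h
  | cons c rest => simp [scanRuns]

theorem scanRuns_step (cs : List Char) (run : Int) (prev : Option Char) (j : Nat)
    (h : j + 1 < cs.length) :
    (scanRuns cs run prev).getD (j + 1) 0 =
      if altPair (some (cs.getD j ' ')) (cs.getD (j + 1) ' ')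
      then (scanRuns cs run prev).getD j 0 + 1 else 1 := by
  induction cs generalizing run prev j with
  | nil => simp at h
  | cons c rest ih =>
    cases j with
    | zero =>
      have hrest : rest ≠ [] := by
        cases rest with
        | nil => simp at h
        | cons _ _ => simp
      simp only [scanRuns, List.getD_cons_succ, List.getD_cons_zero]
      rw [scanRuns_getD_zero rest _ (some c) hrest]
    | succ j =>
      have h' : j + 1 < rest.length := by simpa using h
      simp only [scanRuns, List.getD_cons_succ]
      rw [ih _ (some c) j h']

theorem scanRuns_pos (cs : List Char) (run : Int) (prev : Option Char) (hrun : 0 ≤ run)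
    (j : Nat) (h : j < cs.length) : 1 ≤ (scanRuns cs run prev).getD j 0 := by
  induction cs generalizing run prev j with
  | nil => simp at h
  | cons c rest ih =>
    cases j with
    | zero => simp only [scanRuns, List.getD_cons_zero]; split <;> omega
    | succ j =>
      have h' : j < rest.length := by simpa using h
      simp only [scanRuns, List.getD_cons_succ]
      exact ih _ _ (by split <;> omega) j h'

theorem chainL_runL (cs : List Char) (j : Nat) (hj : j < cs.length) (e : Bool) :
    chainL cs (j : Int) e =
      if cs.getD j ' ' = (if e then 'L' else 'R')
      then (scanRuns cs 0 none).getD j 0 else 0 := by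
  induction j using Nat.strong_induction_on generalizing e with
  | _ j ih =>
    rw [chainL, dif_pos (by omega : (0:Int) ≤ (j:Int)), Int.toNat_natCast]
    by_cases hc : cs.getD j ' ' = (if e then 'L' else 'R')
    · rw [if_pos hc, if_pos hc]
      cases j with
      | zero =>
        rw [show ((0:Nat):Int) - 1 = -1 by norm_num, chainL, dif_neg (by omega)]
        rw [scanRuns_getD_zero cs 0 none (by intro hnil; rw [hnil] at hj; simp at hj)]
        simp [altPair]
      | succ k =>
        have hk : k < cs.length := by omega
        rw [show ((k+1:Nat):Int) - 1 = (k:Int) by push_cast; ring]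
        rw [ih k (by omega) hk (!e)]
        by_cases hc2 : cs.getD k ' ' = (if !e then 'L' else 'R')
        · rw [if_pos hc2, scanRuns_step cs 0 none k (by omega), if_pos ?_]
          · omega
          · cases e <;> simp_all [altPair]
        · rw [if_neg hc2, scanRuns_step cs 0 none k (by omega), if_neg ?_]
          · omega
          · cases e <;> simp_all [altPair]
    · rw [if_neg hc, if_neg hc]

theorem reverse_getD (cs : List Char) (j : Nat) (h : j < cs.length) :
    cs.reverse.getD j ' ' = cs.getD (cs.length - 1 - j) ' ' := by
  rw [List.getD_eq_getElem?_getD, List.getD_eq_getElem?_getD, List.getElem?_reverse h]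

theorem runR_getD (cs : List Char) (i : Nat) (h : i < cs.length) :
    ((scanRuns cs.reverse 0 none).reverse).getD i 0 =
      (scanRuns cs.reverse 0 none).getD (cs.length - 1 - i) 0 := by
  rw [List.getD_eq_getElem?_getD, List.getD_eq_getElem?_getD,
    List.getElem?_reverse (by rw [scanRuns_length, List.length_reverse]; exact h),
    scanRuns_length, List.length_reverse]

theorem runR_pos (cs : List Char) (i : Nat) (h : i < cs.length) :
    1 ≤ ((scanRuns cs.reverse 0 none).reverse).getD i 0 := by
  rw [runR_getD cs i h]
  exact scanRuns_pos cs.reverse 0 none (by omega) _ (by rw [List.length_reverse]; omega)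

theorem runR_step (cs : List Char) (i : Nat) (h : i + 1 < cs.length) :
    ((scanRuns cs.reverse 0 none).reverse).getD i 0 =
      if altPair (some (cs.getD (i + 1) ' ')) (cs.getD i ' ')
      then ((scanRuns cs.reverse 0 none).reverse).getD (i + 1) 0 + 1 else 1 := by
  rw [runR_getD cs i (by omega), runR_getD cs (i + 1) (by omega)]
  have h1 : cs.length - 1 - i = (cs.length - 2 - i) + 1 := by omega
  rw [h1, scanRuns_step cs.reverse 0 none _ (by rw [List.length_reverse]; omega)]
  rw [reverse_getD cs _ (by omega), reverse_getD cs _ (by omega)]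
  have e1 : cs.length - 1 - (cs.length - 2 - i) = i + 1 := by omega
  have e2 : cs.length - 1 - (cs.length - 2 - i + 1) = i := by omega
  rw [e1, e2]
  have e3 : cs.length - 2 - i = cs.length - 1 - (i + 1) := by omega
  rw [e3]

theorem chainR_runR (cs : List Char) (n : Int) (hm : n + 1 ≤ (cs.length : Int))
    (k : Nat) : ∀ (i : Nat) (e : Bool), (n = (i : Int) + k) →
    chainR cs n (i : Int) e =
      if cs.getD i ' ' = (if e then 'R' else 'L')
      then min (((scanRuns cs.reverse 0 none).reverse).getD i 0) (n + 1 - i) else 0 := by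
  induction k with
  | zero =>
    intro i e hn
    have him : i < cs.length := by omega
    rw [chainR, dif_pos (by omega : (i:Int) ≤ n), Int.toNat_natCast]
    by_cases hc : cs.getD i ' ' = (if e then 'R' else 'L')
    · rw [if_pos hc, if_pos hc, chainR, dif_neg (by omega)]
      have := runR_pos cs i him
      omega
    · rw [if_neg hc, if_neg hc]
  | succ k ih =>
    intro i e hn
    have him : i < cs.length := by omega
    have him1 : i + 1 < cs.length := by omega
    rw [chainR, dif_pos (by omega : (i:Int) ≤ n), Int.toNat_natCast]
    by_cases hc : cs.getD i ' ' = (if e then 'R' else 'L')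
    · rw [if_pos hc, if_pos hc]
      rw [show (i:Int) + 1 = ((i+1:Nat):Int) by push_cast; ring]
      rw [ih (i + 1) (!e) (by push_cast; omega)]
      by_cases hc2 : cs.getD (i + 1) ' ' = (if !e then 'R' else 'L')
      · rw [if_pos hc2, runR_step cs i him1, if_pos ?_]
        · push_cast; omega
        · cases e <;> simp_all [altPair]
      · rw [if_neg hc2, runR_step cs i him1, if_neg ?_]
        · have := runR_pos cs (i + 1) him1
          push_cast; omega
        · cases e <;> simp_all [altPair]
    · rw [if_neg hc, if_neg hc]

-- ===== VERDICT (by name: the statement is the Claim_ definition above) =====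
theorem solve_spec : Claim_equal_solve := by
  intro n s _hdom hpre
  unfold Spec_solve solve solve_alt
  apply List.map_congr_left
  intro i hi
  rw [PySem.List.mem_pyRange_one] at hi
  have hm : n + 1 ≤ (s.toList.length : Int) := by
    rcases hpre with h | h
    · omega
    · exact h
  set cs := s.toList with hcs
  set j := i.toNat with hj
  have hij : i = (j : Int) := by omega
  have hjm : j < cs.length := by omega
  have hmod0 : (PySem.Int.mod 0 2 == 0) = true := by decide
  have hL : solveLeftLoop s (i - 1) 0 =
      (if 1 ≤ i && pyChar s (i - 1) == 'L'
       then (PySem.List.pyGet? (scanRuns cs 0 none) (i - 1)).getD 0 else 0) := by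
    rcases Nat.eq_zero_or_pos j with hj0 | hj1
    · have hi0 : i = 0 := by omega
      rw [hi0]
      rw [show (0:Int) - 1 = -1 from by norm_num]
      rw [solveLeftLoop_chain s (-1) 0 (by omega), hmod0, chainL, dif_neg (by omega)]
      norm_num
    · have hi1 : i - 1 = ((j - 1 : Nat) : Int) := by omega
      rw [solveLeftLoop_chain s (i - 1) 0 (by omega), hmod0, hi1]
      rw [chainL_runL cs (j - 1) (by omega) true]
      rw [pyChar_nonneg s _ (by omega), Int.toNat_natCast]
      rw [PySem.List.pyGet?_natCast]
      have h1i : 1 ≤ i := by omega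
      by_cases hc : cs.getD (j - 1) ' ' = 'L'
      · rw [List.getD_eq_getElem?_getD] at hc
        simp [← hcs, hc, h1i]
      · rw [List.getD_eq_getElem?_getD] at hc
        simp [← hcs, hc, h1i]
  have hR : solveRightLoop s n i 0 =
      (if pyChar s i == 'R'
       then min ((PySem.List.pyGet? ((scanRuns cs.reverse 0 none).reverse) i).getD 0) (n + 1 - i)
       else 0) := by
    rw [solveRightLoop_chain s n i 0 (by omega) (by omega), hmod0, hij]
    rw [chainR_runR cs n hm ((n - i).toNat) j true (by omega)]
    rw [pyChar_nonneg s _ (by omega), Int.toNat_natCast]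
    rw [PySem.List.pyGet?_natCast]
    by_cases hc : cs.getD j ' ' = 'R'
    · rw [List.getD_eq_getElem?_getD] at hc
      simp [← hcs, hc]
    · rw [List.getD_eq_getElem?_getD] at hc
      simp [← hcs, hc]
  rw [hL, hR]
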